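-- pv_equiv track=rewrite | github.com/Jing-L97/Infants-word-acquisition | util/Preprocess.py | matching_part
-- ===== SOURCE A (Python) =====
-- def matching_part(text, trans, section):
--     text_lowered = text.lower()
--     trans_lowered = trans.lower()
--
--     trans_lst = trans_lowered.split(" ")
--     key_lst = []
--     n = 0
--     while n < len(trans_lst):
--         string = ''
--         for word in trans_lst[n:n+5]:
--             string +=  word + ' '
--         key_lst.append(string[:-1])
--
--         n += 1
--     text_index_lst = []
--     trans_index_lst = []
--
--     for key in key_lst[:-4]:
--             # if there is matching part
--             if text_lowered.find(key) != -1: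
--                 text_index_lst.append(text_lowered.find(key))
--                 trans_index_lst.append(trans_lowered.find(key))
--
--     if section == "begin":
--
--         if len(trans_index_lst) > 0:
--             matched = trans[:trans_index_lst[0]] + text[text_index_lst[0]:]
--         else:
--             matched = trans + text
--
--     else:
--
--         if len(trans_index_lst) > 0:
--             # attach them together: use the overlapping part as the anchoring
--             matched = text[:text_index_lst[-1]] + trans[trans_index_lst[-1]:]
--         else:
--             matched = text + trans
--
--     return matched
-- ===== SOURCE B (Python) =====
-- def matching_part(text, trans, section):
--     tl = text.lower()
--     rl = trans.lower()
--     words = rl.split(" ")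
--     keys = [" ".join(words[i:i+5]) for i in range(len(words) - 4)]
--     if section == "begin":
--         for key in keys:
--             t = tl.find(key)
--             if t != -1:
--                 return trans[:rl.find(key)] + text[t:]
--         return trans + text
--     for key in reversed(keys):
--         t = tl.find(key)
--         if t != -1:
--             return text[:t] + trans[rl.find(key):]
--     return text + trans
-- ===== Notes on version B (the rewrite author's own statement) =====
-- stated objective: simpler
-- what changed: Instead of materializing every 5-gram key, filtering them into two parallel index lists and indexing [0]/[-1], B builds only the len-4 full 5-word windows and returns early at the first matching key (scanning forward for 'begin', backward otherwise), calling find once per key.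
import Mathlib
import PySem

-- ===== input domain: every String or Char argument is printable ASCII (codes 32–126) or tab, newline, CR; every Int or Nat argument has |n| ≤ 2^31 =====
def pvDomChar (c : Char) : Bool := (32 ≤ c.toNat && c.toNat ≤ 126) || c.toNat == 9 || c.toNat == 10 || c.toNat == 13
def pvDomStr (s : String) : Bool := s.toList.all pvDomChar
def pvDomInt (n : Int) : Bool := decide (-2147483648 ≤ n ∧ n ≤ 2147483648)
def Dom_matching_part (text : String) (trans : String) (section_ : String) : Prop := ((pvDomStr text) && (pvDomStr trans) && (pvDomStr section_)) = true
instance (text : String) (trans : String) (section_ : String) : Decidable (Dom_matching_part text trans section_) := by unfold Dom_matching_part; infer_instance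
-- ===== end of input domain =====

-- B replaces A's materialize-all-keys-then-index-[0]/[-1] pipeline by building only the
-- full 5-word windows and returning early at the first matching key (forward for "begin",
-- backward otherwise); objective: simpler.

-- ===== PORT A =====
def matching_part (text : String) (trans : String) (section_ : String) : String :=
  let text_lowered := PySem.Str.lower text
  let trans_lowered := PySem.Str.lower trans
  let trans_lst := (PySem.Str.split? trans_lowered " ").getD []
  let key_lst := (PySem.List.pyRange 0 (trans_lst.length : Int) 1).map (fun n =>
    PySem.Str.slice
      ((PySem.List.slice trans_lst (some n) (some (n + 5))).foldl
        (fun s w => s ++ w ++ " ") "")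
      none (some (-1)))
  let idx := (PySem.List.slice key_lst none (some (-4))).foldl
    (fun (acc : List Int × List Int) key =>
      if PySem.Str.find text_lowered key != -1 then
        (acc.1 ++ [PySem.Str.find text_lowered key], acc.2 ++ [PySem.Str.find trans_lowered key])
      else acc) ([], [])
  if section_ == "begin" then
    if 0 < idx.2.length then
      PySem.Str.slice trans none (some (PySem.List.pyGetD idx.2 0 0)) ++
      PySem.Str.slice text (some (PySem.List.pyGetD idx.1 0 0)) none
    else trans ++ text
  else
    if 0 < idx.2.length then
      PySem.Str.slice text none (some (PySem.List.pyGetD idx.1 (-1) 0)) ++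
      PySem.Str.slice trans (some (PySem.List.pyGetD idx.2 (-1) 0)) none
    else text ++ trans

-- ===== PORT B =====
def mpAltBegin (text trans tl rl : String) : List String → String
  | [] => trans ++ text
  | key :: ks =>
    let t := PySem.Str.find tl key
    if t != -1 then
      PySem.Str.slice trans none (some (PySem.Str.find rl key)) ++
      PySem.Str.slice text (some t) none
    else mpAltBegin text trans tl rl ks

def mpAltEnd (text trans tl rl : String) : List String → String
  | [] => text ++ trans
  | key :: ks =>
    let t := PySem.Str.find tl key
    if t != -1 then
      PySem.Str.slice text none (some t) ++
      PySem.Str.slice trans (some (PySem.Str.find rl key)) none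
    else mpAltEnd text trans tl rl ks

def matching_part_alt (text : String) (trans : String) (section_ : String) : String :=
  let tl := PySem.Str.lower text
  let rl := PySem.Str.lower trans
  let words := (PySem.Str.split? rl " ").getD []
  let keys := (PySem.List.pyRange 0 ((words.length : Int) - 4) 1).map (fun i =>
    PySem.Str.join " " (PySem.List.slice words (some i) (some (i + 5))))
  if section_ == "begin" then mpAltBegin text trans tl rl keys
  else mpAltEnd text trans tl rl keys.reverse

-- ===== PRECONDITION & SPEC =====
def Spec_matching_part (text : String) (trans : String) (section_ : String) (out : String) : Prop := out = matching_part_alt text trans section_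
instance (text : String) (trans : String) (section_ : String) (out : String) : Decidable (Spec_matching_part text trans section_ out) := by unfold Spec_matching_part; infer_instance

-- ===== CLAIM (what is proved, stated in full; the proofs are below) =====
def Claim_equal_matching_part : Prop := ∀ (text : String) (trans : String) (section_ : String), Dom_matching_part text trans section_ → Spec_matching_part text trans section_ (matching_part text trans section_)

-- ===== LEMMAS AND PROOFS =====

-- A's building of one key: fold words with trailing spaces, then drop the last char.
theorem mpFoldToList (l : List String) (c : String) :
    (l.foldl (fun s w => s ++ w ++ " ") c).toList
      = c.toList ++ (l.map (fun w => w.toList ++ [' '])).flatten := by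
  induction l generalizing c with
  | nil => simp
  | cons a t ih => simp [ih, List.append_assoc]

theorem mpDropLastFlattenJoin (l : List String) :
    ((l.map (fun w => w.toList ++ [' '])).flatten).dropLast
      = PySem.Chars.join [' '] (l.map String.toList) := by
  induction l with
  | nil => simp [PySem.Chars.join, List.intercalate]
  | cons a t ih =>
    cases t with
    | nil => simp [PySem.Chars.join_singleton]
    | cons b u =>
      have hne : ((List.map (fun w => w.toList ++ [' ']) (b :: u)).flatten) ≠ [] := by
        simp [List.flatten_cons]
      rw [List.map_cons, List.flatten_cons, List.dropLast_append_of_ne_nil hne, ih]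
      simp only [List.map_cons]
      rw [PySem.Chars.join_cons_cons, List.append_assoc]

-- A's key (fold + [:-1]) IS " ".join of the same window.
theorem mpKeyEq (l : List String) :
    PySem.Str.slice (l.foldl (fun s w => s ++ w ++ " ") "") none (some (-1))
      = PySem.Str.join " " l := by
  apply String.toList_inj.mp
  rw [PySem.Str.slice_to_neg_one, mpFoldToList]
  rw [PySem.Str.toList_join]
  simpa using mpDropLastFlattenJoin l

-- A's key_lst[:-4] is exactly B's list of full 5-word windows.
theorem mpKeysEq (words : List String) :
    PySem.List.slice
      ((PySem.List.pyRange 0 (words.length : Int) 1).map (fun n =>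
        PySem.Str.slice
          ((PySem.List.slice words (some n) (some (n + 5))).foldl
            (fun s w => s ++ w ++ " ") "")
          none (some (-1))))
      none (some (-4))
    = (PySem.List.pyRange 0 ((words.length : Int) - 4) 1).map (fun i =>
        PySem.Str.join " " (PySem.List.slice words (some i) (some (i + 5)))) := by
  simp only [mpKeyEq]
  rw [PySem.List.slice_to_neg_ofNat _ 4 (by norm_num)]
  rw [PySem.List.pyRange_one, PySem.List.pyRange_one]
  simp only [List.length_map, List.length_range, Int.sub_zero, Int.toNat_natCast]
  rw [← List.map_take, ← List.map_take, List.take_range]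
  have h4 : min (words.length - 4) words.length = ((words.length : Int) - 4).toNat := by omega
  rw [h4]

-- A's two-list accumulator fold is filter-then-map.
theorem mpFoldPairs (p : String → Bool) (f g : String → Int) (ks : List String)
    (acc1 acc2 : List Int) :
    ks.foldl (fun (acc : List Int × List Int) k =>
        if p k then (acc.1 ++ [f k], acc.2 ++ [g k]) else acc) (acc1, acc2)
      = (acc1 ++ (ks.filter p).map f, acc2 ++ (ks.filter p).map g) := by
  induction ks generalizing acc1 acc2 with
  | nil => simp
  | cons k ks ih =>
    by_cases hp : p k
    · simp [hp, ih, List.append_assoc]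
    · simp [hp, ih]

theorem mpPyGetDZero (a : Int) (l : List Int) (d : Int) :
    PySem.List.pyGetD (a :: l) 0 d = a := by
  simp [PySem.List.pyGetD, PySem.List.pyGet?, PySem.List.pyIdx?]

theorem mpPyGetDLast (l : List Int) (a : Int) (d : Int) :
    PySem.List.pyGetD (l ++ [a]) (-1) d = a := by
  simp [PySem.List.pyGetD, PySem.List.pyGet?, PySem.List.pyIdx?]

-- "begin": A's head-of-filtered-lists value IS B's first-match scan.
theorem mpBeginEq (text trans tl rl : String) (ks : List String) :
    (if 0 < ((ks.filter (fun k => PySem.Str.find tl k != -1)).map (PySem.Str.find rl)).length then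
      PySem.Str.slice trans none
        (some (PySem.List.pyGetD ((ks.filter (fun k => PySem.Str.find tl k != -1)).map (PySem.Str.find rl)) 0 0)) ++
      PySem.Str.slice text
        (some (PySem.List.pyGetD ((ks.filter (fun k => PySem.Str.find tl k != -1)).map (PySem.Str.find tl)) 0 0)) none
    else trans ++ text)
    = mpAltBegin text trans tl rl ks := by
  induction ks with
  | nil => simp [mpAltBegin]
  | cons k ks ih =>
    by_cases hp : (PySem.Str.find tl k != -1) = true
    · rw [List.filter_cons_of_pos (p := fun k => PySem.Str.find tl k != -1) hp]
      simp only [List.map_cons, List.length_cons, mpPyGetDZero, mpAltBegin, hp]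
      rw [if_pos (Nat.succ_pos _)]
      simp
    · rw [Bool.not_eq_true] at hp
      rw [List.filter_cons_of_neg (p := fun k => PySem.Str.find tl k != -1) (by simpa using hp), ih]
      simp only [mpAltBegin, hp]
      simp

-- else: A's last-of-filtered-lists value IS B's first-match scan over the reversed keys.
theorem mpEndEq (text trans tl rl : String) (r : List String) :
    (if 0 < ((r.reverse.filter (fun k => PySem.Str.find tl k != -1)).map (PySem.Str.find rl)).length then
      PySem.Str.slice text none
        (some (PySem.List.pyGetD ((r.reverse.filter (fun k => PySem.Str.find tl k != -1)).map (PySem.Str.find tl)) (-1) 0)) ++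
      PySem.Str.slice trans
        (some (PySem.List.pyGetD ((r.reverse.filter (fun k => PySem.Str.find tl k != -1)).map (PySem.Str.find rl)) (-1) 0)) none
    else text ++ trans)
    = mpAltEnd text trans tl rl r := by
  induction r with
  | nil => simp [mpAltEnd]
  | cons k r ih =>
    by_cases hp : (PySem.Str.find tl k != -1) = true
    · rw [List.reverse_cons, List.filter_append, List.filter_cons_of_pos (p := fun k => PySem.Str.find tl k != -1) hp, List.filter_nil]
      simp only [List.map_append, List.map_cons, List.map_nil, mpPyGetDLast,
        List.length_append, List.length_cons, mpAltEnd, hp]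
      rw [if_pos (by omega)]
      simp
    · rw [Bool.not_eq_true] at hp
      rw [List.reverse_cons, List.filter_append, List.filter_cons_of_neg (p := fun k => PySem.Str.find tl k != -1) (by simpa using hp),
        List.filter_nil, List.append_nil, ih]
      simp only [mpAltEnd, hp]
      simp

-- ===== VERDICT (by name: the statement is the Claim_ definition above) =====
set_option maxHeartbeats 1000000 in
theorem matching_part_spec : Claim_equal_matching_part := by
  intro text trans section_ _
  unfold Spec_matching_part
  simp only [matching_part, matching_part_alt]
  generalize (PySem.Str.lower text) = tl
  generalize hrl : (PySem.Str.lower trans) = rl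
  generalize hW : (PySem.Str.split? rl " ").getD [] = words
  rw [mpKeysEq]
  rw [mpFoldPairs (fun k => PySem.Str.find tl k != -1)
    (PySem.Str.find tl) (PySem.Str.find rl)]
  simp only [List.nil_append]
  by_cases hs : (section_ == "begin") = true
  · rw [if_pos hs, if_pos hs]
    exact mpBeginEq text trans _ _ _
  · rw [if_neg hs, if_neg hs]
    conv_lhs => rw [← List.reverse_reverse
      ((PySem.List.pyRange 0 ((words.length : Int) - 4) 1).map (fun i =>
        PySem.Str.join " " (PySem.List.slice words (some i) (some (i + 5)))))]
    exact mpEndEq text trans _ _ _
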